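-- pv_equiv track=rewrite | github.com/ivanmladek/PolyWeather | src/data_collection/settlement_sources.py | _pick_station_row
-- ===== SOURCE A (Python) =====
-- from typing import Any, Dict, List, Optional
--
-- def _pick_station_row(
--     rows: List[Dict[str, str]], candidates: List[str]
-- ) -> Optional[Dict[str, str]]:
--     if not rows:
--         return None
--     normalized_map = {
--         str(name).strip().lower(): row
--         for row in rows
--         for name in [row.get("Automatic Weather Station")]
--         if isinstance(row, dict) and name
--     }
--     for name in candidates:
--         hit = normalized_map.get(str(name).strip().lower())
--         if hit:
--             return hit
--     for row in rows:
--         station = str(row.get("Automatic Weather Station") or "").strip().lower()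
--         if "observatory" in station:
--             return row
--     return rows[0] if rows else None
-- ===== SOURCE B (Python) =====
-- from typing import Dict, List, Optional
--
-- def _pick_station_row(
--     rows: List[Dict[str, str]], candidates: List[str]
-- ) -> Optional[Dict[str, str]]:
--     if not rows:
--         return None
--     # Loop inversion: a single pass over rows. For each row with a truthy station
--     # name we find the position of its normalized name in the candidate list and
--     # keep the row with the smallest candidate position (<= so the LAST row wins on
--     # duplicate names, like A's dict comprehension); the same pass also remembers
--     # the first row whose station name contains "observatory".
--     keys = [str(c).strip().lower() for c in candidates]
--     n = len(keys)
--     best_i, best_row, obs_row = n, None, None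
--     for row in rows:
--         name = row.get("Automatic Weather Station") if isinstance(row, dict) else None
--         if name:
--             key = str(name).strip().lower()
--             try:
--                 i = keys.index(key)
--             except ValueError:
--                 i = n
--             if i <= best_i and i < n:
--                 best_i, best_row = i, row
--             if obs_row is None and "observatory" in key:
--                 obs_row = row
--     if best_row is not None:
--         return best_row
--     if obs_row is not None:
--         return obs_row
--     return rows[0]
-- ===== Notes on version B (the rewrite author's own statement) =====
-- stated objective: alternative
-- what changed: B inverts the loops: instead of A's precomputed normalized_map plus a per-candidate lookup loop plus a separate observatory fallback loop, B makes a single pass over the rows keeping the row whose normalized station name has the smallest candidate-list position (last row wins on ties, reproducing the dict's last-wins) while simultaneously remembering the first observatory row, then returns best, else observatory row, else rows[0].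
import Mathlib
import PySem

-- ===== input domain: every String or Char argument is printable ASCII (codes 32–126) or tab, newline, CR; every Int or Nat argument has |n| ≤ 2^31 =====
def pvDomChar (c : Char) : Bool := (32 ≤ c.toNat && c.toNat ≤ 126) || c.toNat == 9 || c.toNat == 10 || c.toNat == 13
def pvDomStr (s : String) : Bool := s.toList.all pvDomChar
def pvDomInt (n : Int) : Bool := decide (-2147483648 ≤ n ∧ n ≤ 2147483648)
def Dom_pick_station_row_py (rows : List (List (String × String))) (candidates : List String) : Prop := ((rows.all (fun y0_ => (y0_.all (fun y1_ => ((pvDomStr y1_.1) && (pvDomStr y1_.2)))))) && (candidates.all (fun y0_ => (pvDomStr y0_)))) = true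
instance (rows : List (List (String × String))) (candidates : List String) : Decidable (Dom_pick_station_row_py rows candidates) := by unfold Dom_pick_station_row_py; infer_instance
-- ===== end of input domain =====

-- B inverts A's loops: one single pass over the rows tracks the row with the smallest
-- candidate-list position (last wins on ties, like A's dict) and the first observatory
-- row at the same time; no dict, no per-candidate loop, no separate fallback loop
-- (objective: alternative, same cost class).

-- shared normalization helper: str(x).strip().lower()
def normKey (s : String) : String := PySem.Str.lower (PySem.Str.strip s)

-- row.get(k) on a row (a Python dict, here an association list): first match
def rowGet? (r : List (String × String)) (k : String) : Option String :=
  (PySem.Dict.mk r).get? k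

def awsKey : String := "Automatic Weather Station"

-- ===== PORT A =====
-- the dict comprehension: fold left, insert (last row wins) when the row has a truthy
-- station name (isinstance(row, dict) is always true under the type convention)
def buildMap (rows : List (List (String × String))) : PySem.Dict String (List (String × String)) :=
  rows.foldl
    (fun d row =>
      match rowGet? row awsKey with
      | some name => if name ≠ "" then d.insert (normKey name) row else d
      | none => d)
    PySem.Dict.empty

-- A's first loop: normalized_map.get(...); 'if hit:' = hit is a nonempty dict
def candLoopA (m : PySem.Dict String (List (String × String))) :
    List String → Option (List (String × String))
  | [] => none
  | c :: cs =>
      match m.get? (normKey c) with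
      | some hit => if hit ≠ [] then some hit else candLoopA m cs
      | none => candLoopA m cs

-- A's second loop: first row whose station contains "observatory"
def obsLoop : List (List (String × String)) → Option (List (String × String))
  | [] => none
  | r :: rs =>
      let station := normKey ((rowGet? r awsKey).getD "")   -- str(row.get(...) or "").strip().lower(); 'x or ""' = getD "" since strip/lower fix ""
      if PySem.Str.isIn "observatory" station then some r else obsLoop rs

def pick_station_row_py (rows : List (List (String × String))) (candidates : List String) : Option (List (String × String)) :=
  if rows = [] then none
  else
    match candLoopA (buildMap rows) candidates with
    | some hit => some hit
    | none =>
        match obsLoop rows with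
        | some r => some r
        | none => rows.head?   -- rows[0] if rows else None

-- ===== PORT B =====
-- Source B's best-row update: if i <= best_i and i < n: best_i, best_row = i, row
def bestUpd (keys : List String) (i : Nat) (row : List (String × String))
    (acc : Nat × Option (List (String × String)) × Option (List (String × String))) :
    Nat × Option (List (String × String)) × Option (List (String × String)) :=
  if i ≤ acc.1 ∧ i < keys.length then (i, some row, acc.2.2) else acc

-- Source B's obs-row update: if obs_row is None and "observatory" in key: obs_row = row
def obsUpd (key : String) (row : List (String × String))
    (acc : Nat × Option (List (String × String)) × Option (List (String × String))) :
    Nat × Option (List (String × String)) × Option (List (String × String)) :=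
  if acc.2.2 = none ∧ PySem.Str.isIn "observatory" key then (acc.1, acc.2.1, some row) else acc

-- the body of Source B's single for-loop over rows, on state (best_i, best_row, obs_row)
def stepB (keys : List String)
    (acc : Nat × Option (List (String × String)) × Option (List (String × String)))
    (row : List (String × String)) :
    Nat × Option (List (String × String)) × Option (List (String × String)) :=
  match rowGet? row awsKey with          -- name = row.get(...); isinstance is always true here
  | some name =>
      if name ≠ "" then                  -- 'if name:'
        obsUpd (normKey name) row
          (bestUpd keys ((PySem.List.index? keys (normKey name)).getD keys.length) row acc)
          -- i = keys.index(key) (try/except ValueError: i = n), then the two updates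
      else acc
  | none => acc

def pick_station_row_py_alt (rows : List (List (String × String))) (candidates : List String) : Option (List (String × String)) :=
  if rows = [] then none
  else
    match rows.foldl (stepB (candidates.map normKey))
        ((candidates.map normKey).length, none, none) with
    | (_, some r, _) => some r           -- best_row is not None
    | (_, none, some r) => some r        -- obs_row is not None
    | (_, none, none) => rows.head?      -- rows[0]

-- ===== PRECONDITION & SPEC =====
def Spec_pick_station_row_py (rows : List (List (String × String))) (candidates : List String) (out : Option (List (String × String))) : Prop := out = pick_station_row_py_alt rows candidates
instance (rows : List (List (String × String))) (candidates : List String) (out : Option (List (String × String))) : Decidable (Spec_pick_station_row_py rows candidates out) := by unfold Spec_pick_station_row_py; infer_instance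

-- ===== CLAIM (what is proved, stated in full; the proofs are below) =====
def Claim_equal_pick_station_row_py : Prop := ∀ (rows : List (List (String × String))) (candidates : List String), Dom_pick_station_row_py rows candidates → Spec_pick_station_row_py rows candidates (pick_station_row_py rows candidates)

-- ===== LEMMAS AND PROOFS =====

-- does row have a truthy station name normalizing to key k?
def matchesKey (k : String) (r : List (String × String)) : Bool :=
  match rowGet? r awsKey with
  | some station => decide (station ≠ "") && (normKey station == k)
  | none => false

-- spec of B's best-row component: first key with a match, last matching row (scan reversed)
def bestSpec (rows : List (List (String × String))) :
    List String → Option (List (String × String))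
  | [] => none
  | k :: ks =>
      match rows.reverse.find? (matchesKey k) with
      | some r => some r
      | none => bestSpec rows ks

-- spec of B's best_i component: position of the first key with a match (length if none)
def giSpec (rows : List (List (String × String))) : List String → Nat
  | [] => 0
  | k :: ks => if rows.any (matchesKey k) then 0 else giSpec rows ks + 1

-- spec of B's obs_row component
def obsPred (r : List (String × String)) : Bool :=
  match rowGet? r awsKey with
  | some n => decide (n ≠ "") && PySem.Str.isIn "observatory" (normKey n)
  | none => false

theorem find?_reverse_some_of_any {p : List (String × String) → Bool}
    {rows : List (List (String × String))} (h : rows.any p = true) :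
    ∃ r, rows.reverse.find? p = some r := by
  rcases hf : rows.reverse.find? p with _ | r
  · rw [List.find?_eq_none] at hf
    rw [List.any_eq_true] at h
    obtain ⟨r, hr, hp⟩ := h
    exact absurd hp (by simpa using hf r (List.mem_reverse.mpr hr))
  · exact ⟨r, rfl⟩

-- the key append lemma: adding a row r (with truthy name) at the END updates
-- (giSpec, bestSpec) exactly the way Source B's loop body does.
theorem gi_best_append (rows : List (List (String × String)))
    (r : List (String × String)) (keys : List String) (name : String)
    (h : rowGet? r awsKey = some name) (hne : name ≠ "") :
    (giSpec (rows ++ [r]) keys, bestSpec (rows ++ [r]) keys)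
      = (if (PySem.List.index? keys (normKey name)).getD keys.length ≤ giSpec rows keys
            ∧ (PySem.List.index? keys (normKey name)).getD keys.length < keys.length
         then ((PySem.List.index? keys (normKey name)).getD keys.length, some r)
         else (giSpec rows keys, bestSpec rows keys)) := by
  induction keys with
  | nil =>
    simp [giSpec, bestSpec, PySem.List.index?]
  | cons k ks ih =>
    have hmr : ∀ k', matchesKey k' r = (normKey name == k') := by
      intro k'; simp [matchesKey, h, hne]
    by_cases hk : k = normKey name
    · subst hk
      have hi : PySem.List.index? (normKey name :: ks) (normKey name) = some 0 :=
        PySem.List.index?_cons_self _ _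
      have hid : (PySem.List.index? (normKey name :: ks) (normKey name)).getD
          (normKey name :: ks).length = 0 := by rw [hi]; rfl
      have hany : (rows ++ [r]).any (matchesKey (normKey name)) = true := by
        simp [hmr]
      have hfind : List.find? (matchesKey (normKey name)) (r :: rows.reverse) = some r := by
        simp [hmr]
      have hgiL : giSpec (rows ++ [r]) (normKey name :: ks) = 0 := by
        simp [giSpec, hany]
      have hbL : bestSpec (rows ++ [r]) (normKey name :: ks) = some r := by
        simp only [bestSpec, List.reverse_append, List.reverse_singleton,
          List.singleton_append, hfind]
      rw [hgiL, hbL, hid, if_pos ⟨Nat.zero_le _, by simp⟩]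
    · have hi : PySem.List.index? (k :: ks) (normKey name)
          = (PySem.List.index? ks (normKey name)).map (· + 1) :=
        PySem.List.index?_cons_of_ne ks hk
      have hmrk : matchesKey k r = false := by
        simp [hmr]; exact fun he => hk he.symm
      have hany : (rows ++ [r]).any (matchesKey k) = rows.any (matchesKey k) := by
        simp [hmrk]
      have hival : (PySem.List.index? (k :: ks) (normKey name)).getD (k :: ks).length
          = (PySem.List.index? ks (normKey name)).getD ks.length + 1 := by
        rw [hi]
        rcases PySem.List.index? ks (normKey name) with _ | j <;> simp
      by_cases hA : rows.any (matchesKey k) = true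
      · -- first key already matched: best position stays 0, nothing moves
        obtain ⟨r', hf⟩ := find?_reverse_some_of_any hA
        have hgiL : giSpec (rows ++ [r]) (k :: ks) = 0 := by
          simp [giSpec, hany, hA]
        have hgiR : giSpec rows (k :: ks) = 0 := by simp [giSpec, hA]
        have hbL : bestSpec (rows ++ [r]) (k :: ks) = some r' := by
          simp only [bestSpec, List.reverse_append, List.reverse_singleton,
            List.singleton_append, List.find?_cons, hmrk, hf]
        have hbR : bestSpec rows (k :: ks) = some r' := by simp [bestSpec, hf]
        rw [hgiL, hbL, hgiR, hbR, hival, if_neg (by omega)]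
      · -- first key unmatched by old rows and by r: shift by one and use ih
        have hA' : rows.any (matchesKey k) = false := by
          rcases hx : rows.any (matchesKey k) with _ | _
          · rfl
          · exact absurd hx hA
        have hf : rows.reverse.find? (matchesKey k) = none := by
          rw [List.find?_eq_none]
          intro a ha
          rw [List.any_eq_false] at hA'
          simpa using hA' a (List.mem_reverse.mp ha)
        have hgiL : giSpec (rows ++ [r]) (k :: ks) = giSpec (rows ++ [r]) ks + 1 := by
          simp [giSpec, hany, hA']
        have hgiR : giSpec rows (k :: ks) = giSpec rows ks + 1 := by
          simp [giSpec, hA']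
        have hbL : bestSpec (rows ++ [r]) (k :: ks) = bestSpec (rows ++ [r]) ks := by
          simp only [bestSpec, List.reverse_append, List.reverse_singleton,
            List.singleton_append, List.find?_cons, hmrk, hf]
        have hbR : bestSpec rows (k :: ks) = bestSpec rows ks := by
          simp [bestSpec, hf]
        rw [hgiL, hbL, hgiR, hbR, hival, List.length_cons]
        by_cases hc : (PySem.List.index? ks (normKey name)).getD ks.length ≤ giSpec rows ks
            ∧ (PySem.List.index? ks (normKey name)).getD ks.length < ks.length
        · rw [if_pos hc] at ih
          rw [if_pos (by omega)]
          rw [Prod.mk.injEq] at ih ⊢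
          exact ⟨by rw [ih.1], ih.2⟩
        · rw [if_neg hc] at ih
          rw [if_neg (by omega)]
          rw [Prod.mk.injEq] at ih ⊢
          exact ⟨by rw [ih.1], ih.2⟩

-- when r has no truthy station name it matches no key and no spec changes
theorem gi_best_append_skip (rows : List (List (String × String)))
    (r : List (String × String)) (keys : List String)
    (h : ∀ k, matchesKey k r = false) :
    giSpec (rows ++ [r]) keys = giSpec rows keys
      ∧ bestSpec (rows ++ [r]) keys = bestSpec rows keys := by
  induction keys with
  | nil => simp [giSpec, bestSpec]
  | cons k ks ih =>
    have hany : (rows ++ [r]).any (matchesKey k) = rows.any (matchesKey k) := by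
      simp [h k]
    have hfind : (rows ++ [r]).reverse.find? (matchesKey k)
        = rows.reverse.find? (matchesKey k) := by
      rw [List.reverse_append]; simp [h k]
    constructor
    · simp [giSpec, hany, ih.1]
    · simp only [bestSpec, hfind]
      rcases rows.reverse.find? (matchesKey k) <;> simp [ih.2]

-- find? over an appended singleton
theorem find?_append_singleton (rs : List (List (String × String)))
    (r : List (String × String)) :
    (rs ++ [r]).find? obsPred
      = (rs.find? obsPred).or (if obsPred r = true then some r else none) := by
  rw [List.find?_append]
  rcases hp : obsPred r with _ | _ <;> simp [hp]

theorem giSpec_nil (keys : List String) :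
    giSpec ([] : List (List (String × String))) keys = keys.length := by
  induction keys with
  | nil => rfl
  | cons k ks ih => simp [giSpec, ih]

theorem bestSpec_nil (keys : List String) :
    bestSpec ([] : List (List (String × String))) keys = none := by
  induction keys with
  | nil => rfl
  | cons k ks ih => simp [bestSpec, ih]

-- B's fold computes exactly (giSpec, bestSpec, first obsPred row)
theorem foldB_spec (keys : List String) (rows : List (List (String × String))) :
    rows.foldl (stepB keys) (keys.length, none, none)
      = (giSpec rows keys, bestSpec rows keys, rows.find? obsPred) := by
  induction rows using List.reverseRecOn with
  | nil => simp [giSpec_nil, bestSpec_nil]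
  | append_singleton rs r ih =>
    rw [List.foldl_append, List.foldl_cons, List.foldl_nil, ih,
      find?_append_singleton]
    rcases hg : rowGet? r awsKey with _ | name
    · -- no station key: stepB skips, specs unchanged
      have hm : ∀ k, matchesKey k r = false := by intro k; simp [matchesKey, hg]
      obtain ⟨h1, h2⟩ := gi_best_append_skip rs r keys hm
      have hp : obsPred r = false := by simp [obsPred, hg]
      simp [stepB, hg, h1, h2, hp]
    · by_cases hne : name = ""
      · -- falsy station name: same skip
        subst hne
        have hm : ∀ k, matchesKey k r = false := by intro k; simp [matchesKey, hg]
        obtain ⟨h1, h2⟩ := gi_best_append_skip rs r keys hm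
        have hp : obsPred r = false := by simp [obsPred, hg]
        simp [stepB, hg, h1, h2, hp]
      · -- truthy station name
        have hgb := gi_best_append rs r keys name hg hne
        have hopr : obsPred r = PySem.Str.isIn "observatory" (normKey name) := by
          simp [obsPred, hg, hne]
        simp only [stepB, hg, hne, ne_eq, not_false_iff, if_true, bestUpd, obsUpd, hopr]
        by_cases hc : (PySem.List.index? keys (normKey name)).getD keys.length ≤ giSpec rs keys
            ∧ (PySem.List.index? keys (normKey name)).getD keys.length < keys.length
        · rw [if_pos hc] at hgb
          rw [Prod.mk.injEq] at hgb
          rw [if_pos hc, hgb.1, hgb.2]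
          rcases ho : rs.find? obsPred with _ | o
          · rcases hio : PySem.Str.isIn "observatory" (normKey name) with _ | _ <;>
              simp [hio]
          · simp
        · rw [if_neg hc] at hgb
          rw [Prod.mk.injEq] at hgb
          rw [if_neg hc, hgb.1, hgb.2]
          rcases ho : rs.find? obsPred with _ | o
          · rcases hio : PySem.Str.isIn "observatory" (normKey name) with _ | _ <;>
              simp [ho, hio]
          · simp [ho]

-- the dict built left-to-right with overwrite answers the LAST matching row = first match in reversed(rows)
theorem buildMap_get?_eq_find? (rows : List (List (String × String))) (k : String) :
    (buildMap rows).get? k = rows.reverse.find? (matchesKey k) := by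
  induction rows using List.reverseRecOn with
  | nil => simp [buildMap, PySem.Dict.get?_empty]
  | append_singleton rs r ih =>
    rw [List.reverse_append]
    simp only [buildMap, List.foldl_append, List.foldl_cons, List.foldl_nil] at *
    simp only [List.reverse_singleton, List.singleton_append, List.find?_cons]
    cases hg : rowGet? r awsKey with
    | none => simpa [matchesKey, hg] using ih
    | some name =>
      by_cases hne : name = ""
      · simpa [matchesKey, hg, hne] using ih
      · simp only [hne, ne_eq, not_false_iff, if_true]
        rw [PySem.Dict.get?_insert]
        by_cases hk : normKey name = k
        · subst hk
          simp [matchesKey, hg, hne]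
        · rw [if_neg (fun h => hk h.symm)]
          have hm : matchesKey k r = false := by
            simp [matchesKey, hg, hne, hk]
          rw [hm]
          exact ih

-- a row with a station-name entry is a nonempty dict
theorem matchesKey_ne_nil {k : String} {r : List (String × String)}
    (h : matchesKey k r = true) : r ≠ [] := by
  intro hnil
  subst hnil
  simp [matchesKey, rowGet?, PySem.Dict.get?] at h

-- A's candidate loop equals bestSpec on the normalized candidate keys
theorem candLoopA_eq_bestSpec (rows : List (List (String × String))) (cs : List String) :
    candLoopA (buildMap rows) cs = bestSpec rows (cs.map normKey) := by
  induction cs with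
  | nil => rfl
  | cons c cs ih =>
    simp only [candLoopA, List.map_cons, bestSpec, buildMap_get?_eq_find?]
    cases hf : rows.reverse.find? (matchesKey (normKey c)) with
    | none => simpa using ih
    | some r =>
      have hm : matchesKey (normKey c) r = true := List.find?_some hf
      simp [matchesKey_ne_nil hm]

-- A's fallback loop is find? obsPred ('' never contains "observatory")
theorem obsLoop_eq_find? (rows : List (List (String × String))) :
    obsLoop rows = rows.find? obsPred := by
  induction rows with
  | nil => rfl
  | cons r rs ih =>
    have hrec : obsLoop (r :: rs) = if obsPred r = true then some r else obsLoop rs := by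
      rcases hg : rowGet? r awsKey with _ | name
      · have he : PySem.Str.isIn "observatory" (normKey "") = false := by decide
        have hp : obsPred r = false := by simp [obsPred, hg]
        simp only [obsLoop, hg, Option.getD_none, he, hp, Bool.false_eq_true, if_false]
      · by_cases hne : name = ""
        · subst hne
          have he : PySem.Str.isIn "observatory" (normKey "") = false := by decide
          have hp : obsPred r = false := by simp [obsPred, hg]
          simp only [obsLoop, hg, Option.getD_some, he, hp, Bool.false_eq_true, if_false]
        · have hp : obsPred r = PySem.Str.isIn "observatory" (normKey name) := by
            simp [obsPred, hg, hne]
          simp only [obsLoop, hg, Option.getD_some, hp]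
    rw [hrec, ih, List.find?_cons]
    rcases hp : obsPred r with _ | _ <;> simp [hp]

-- ===== VERDICT (by name: the statement is the Claim_ definition above) =====
theorem pick_station_row_py_spec : Claim_equal_pick_station_row_py := by
  intro rows candidates _
  unfold Spec_pick_station_row_py pick_station_row_py pick_station_row_py_alt
  by_cases hnil : rows = []
  · simp [hnil]
  · rw [if_neg hnil, if_neg hnil]
    simp only [foldB_spec, candLoopA_eq_bestSpec, obsLoop_eq_find?]
    rcases hb : bestSpec rows (candidates.map normKey) with _ | r
    · rcases rows.find? obsPred <;> simp
    · simp
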